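-- pv_equiv track=rewrite | github.com/GarrettMatthews/CS_1410 | Project_1/gm_bookrecs.py | sim_score
-- ===== SOURCE A (Python) =====
-- def dotprod(x,y):
--     """Function to find the dot product of list x and list y"""
--     ans = 0
--     if len(x) == len(y):
--         for i in range(len(x)):
--             ans += x[i] * y[i]
--         return ans
--     elif x == '' or y == '':
--         return None
--     else:
--         return None
--
-- def sim_score(dict):
--     """Finds the similarity score of users based on a inputted dictionary dict"""
--     # Finding dot product for each set of scores
--     result = {}
--     for key1 in dict:
--         temp = {}
--         for key2 in dict:
--             if key1 != key2:
--                 ans = dotprod(dict[key1],dict[key2])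
--                 temp[key2] = ans
--                 result[key1] = temp
--     return result
-- ===== SOURCE B (Python) =====
-- def sim_score(dict):
--     """Finds the similarity score of users based on a inputted dictionary dict"""
--     # Each unordered pair of users is scored once; the product is symmetric,
--     # so the single answer is written in both directions.
--     result = {}
--     pending = list(dict)
--     while pending:
--         k1 = pending.pop(0)
--         x = dict[k1]
--         for k2 in pending:
--             y = dict[k2]
--             ans = sum(a * b for a, b in zip(x, y)) if len(x) == len(y) else None
--             result.setdefault(k1, {})[k2] = ans
--             result.setdefault(k2, {})[k1] = ans
--     return result
-- ===== Notes on version B (the rewrite author's own statement) =====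
-- stated objective: alternative
-- what changed: Instead of A's nested loop over all ordered key pairs (computing every dot product twice and rebuilding a temp row dict per user), B pops each user off a pending list and pairs it only with the users still pending, computing each unordered pair's dot product once (it is symmetric, via zip/sum instead of A's indexed loop) and writing it into both users' rows via setdefault.
import Mathlib
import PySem

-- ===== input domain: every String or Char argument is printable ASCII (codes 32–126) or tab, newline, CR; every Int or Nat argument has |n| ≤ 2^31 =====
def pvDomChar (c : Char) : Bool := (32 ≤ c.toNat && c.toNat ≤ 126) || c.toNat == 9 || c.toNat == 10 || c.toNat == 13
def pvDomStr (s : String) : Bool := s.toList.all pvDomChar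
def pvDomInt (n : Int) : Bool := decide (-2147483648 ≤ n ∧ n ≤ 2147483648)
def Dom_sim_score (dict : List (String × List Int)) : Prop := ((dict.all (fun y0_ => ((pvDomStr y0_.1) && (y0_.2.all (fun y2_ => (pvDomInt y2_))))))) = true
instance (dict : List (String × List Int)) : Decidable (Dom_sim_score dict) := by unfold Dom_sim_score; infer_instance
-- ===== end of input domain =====

-- B restructures A: it scores each unordered pair of users once (the dot product is symmetric,
-- computed by zip/sum) and writes the single answer into both users' rows.

-- ===== PORT A =====
-- A's dotprod: indexed loop over range(len(x)); the 'elif x == "" or y == ""' branch and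
-- the final 'else' both return None, so they are ported as a single none.
def dotprod (x y : List Int) : Option Int :=
  if x.length = y.length then
    some ((PySem.List.pyRange 0 (x.length : Int) 1).foldl
      (fun ans i => ans + PySem.List.pyGetD x i 0 * PySem.List.pyGetD y i 0) 0)
  else
    none

-- body of A's inner 'for key2 in dict' loop (state = (temp, result))
def simInner (d : PySem.Dict String (List Int)) (key1 : String)
    (st : PySem.Dict String (Option Int) × PySem.Dict String (PySem.Dict String (Option Int)))
    (key2 : String) :
    PySem.Dict String (Option Int) × PySem.Dict String (PySem.Dict String (Option Int)) :=
  if key1 ≠ key2 then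
    let ans := dotprod (d.getD key1 []) (d.getD key2 [])
    let temp := st.1.insert key2 ans
    (temp, st.2.insert key1 temp)
  else st

def sim_score (dict : List (String × List Int)) : List (String × List (String × Option Int)) :=
  let d := PySem.Dict.ofList dict
  let result :=
    d.keys.foldl (fun result key1 =>
      (d.keys.foldl (simInner d key1) (PySem.Dict.empty, result)).2) PySem.Dict.empty
  result.items.map (fun p => (p.1, p.2.items))

-- ===== PORT B =====
-- B's dot product: zip/sum closed over equal lengths
def dotOnce (x y : List Int) : Option Int :=
  if x.length = y.length then some (((x.zip y).map (fun p => p.1 * p.2)).sum) else none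

-- body of B's 'for k2 in pending' loop: score the pair once, write it in both directions
def simPair (d : PySem.Dict String (List Int)) (k1 : String)
    (result : PySem.Dict String (PySem.Dict String (Option Int))) (k2 : String) :
    PySem.Dict String (PySem.Dict String (Option Int)) :=
  let y := d.getD k2 []
  let ans := dotOnce (d.getD k1 []) y
  let result := result.modify k1 PySem.Dict.empty (fun inner => inner.insert k2 ans)
  result.modify k2 PySem.Dict.empty (fun inner => inner.insert k1 ans)

-- B's 'while pending' loop
def simLoop (d : PySem.Dict String (List Int)) :
    List String → PySem.Dict String (PySem.Dict String (Option Int)) →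
    PySem.Dict String (PySem.Dict String (Option Int))
  | [], result => result
  | k1 :: pending, result => simLoop d pending (pending.foldl (simPair d k1) result)

def sim_score_alt (dict : List (String × List Int)) : List (String × List (String × Option Int)) :=
  let d := PySem.Dict.ofList dict
  (simLoop d d.keys PySem.Dict.empty).items.map (fun p => (p.1, p.2.items))

-- ===== PRECONDITION & SPEC =====
def Spec_sim_score (dict : List (String × List Int)) (out : List (String × List (String × Option Int))) : Prop := out = sim_score_alt dict
instance (dict : List (String × List Int)) (out : List (String × List (String × Option Int))) : Decidable (Spec_sim_score dict out) := by unfold Spec_sim_score; infer_instance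

-- ===== CLAIM (what is proved, stated in full; the proofs are below) =====
def Claim_equal_sim_score : Prop := ∀ (dict : List (String × List Int)), Dom_sim_score dict → Spec_sim_score dict (sim_score dict)

-- ===== LEMMAS AND PROOFS =====

-- the (k2, score) entry both programs store for user x against user y
def entryB (d : PySem.Dict String (List Int)) (x y : String) : String × Option Int :=
  (y, dotOnce (d.getD x []) (d.getD y []))

-- the full row of user x against every other user of ks, in ks order
def othersFor (d : PySem.Dict String (List Int)) (ks : List String) (x : String) :
    List (String × Option Int) :=
  (ks.filter (fun y => decide (x ≠ y))).map (entryB d x)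

-- the common result both programs reach: every user with a nonempty row, in key order
def specDict (d : PySem.Dict String (List Int)) (ks : List String) :
    PySem.Dict String (PySem.Dict String (Option Int)) :=
  PySem.Dict.mk ((ks.filter (fun x => decide (othersFor d ks x ≠ []))).map
    (fun x => (x, PySem.Dict.mk (othersFor d ks x))))

theorem dot_funext : dotprod = dotOnce := by
  funext x y
  unfold dotprod dotOnce
  by_cases h : x.length = y.length
  · rw [if_pos h, if_pos h]
    congr 1
    have hcast : (x.length : Int) = ((x.zip y).length : Int) := by simp [h]
    rw [hcast]
    rw [PySem.List.foldl_congr_mem _ _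
      (fun acc j => acc + ((PySem.List.pyGetD (x.zip y) j (0, 0)).1 * (PySem.List.pyGetD (x.zip y) j (0, 0)).2)) _
      (by
        intro acc j hj
        have hj' := (PySem.List.mem_pyRange_one).1 hj
        have h0 : 0 ≤ j := hj'.1
        have hjn : j.toNat < (x.zip y).length := by omega
        have hjx : j.toNat < x.length := by simp [h] at hjn; omega
        have hjy : j.toNat < y.length := by omega
        simp only []
        rw [PySem.List.pyGetD_of_nonneg _ _ h0, PySem.List.pyGetD_of_nonneg _ _ h0,
            PySem.List.pyGetD_of_nonneg _ _ h0,
            List.getD_eq_getElem _ _ hjn, List.getD_eq_getElem _ _ hjx,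
            List.getD_eq_getElem _ _ hjy]
        simp)]
    have hfold := PySem.List.foldl_pyRange_pyGetD' (x.zip y) ((0 : Int), (0 : Int))
      (fun acc p => acc + p.1 * p.2) 0 (le_refl 0)
    simp only [] at hfold
    rw [hfold]
    simp [PySem.List.foldl_add]
  · rw [if_neg h, if_neg h]

theorem dotOnce_comm (x y : List Int) : dotOnce x y = dotOnce y x := by
  unfold dotOnce
  by_cases h : x.length = y.length
  · rw [if_pos h, if_pos h.symm]
    congr 1
    rw [← List.zip_swap x y, List.map_map]
    simp [Function.comp_def, mul_comm]
  · rw [if_neg h, if_neg (fun hc => h hc.symm)]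

-- A's inner loop appends one row entry per distinct key and re-inserts the row under key1
theorem A_inner (d : PySem.Dict String (List Int)) (k1 : String) :
    ∀ (l : List String) (temp : PySem.Dict String (Option Int))
      (res : PySem.Dict String (PySem.Dict String (Option Int))),
      (l.filter (fun y => decide (k1 ≠ y))).Nodup →
      (∀ y ∈ l, k1 ≠ y → temp.contains y = false) →
      l.foldl (simInner d k1) (temp, res) =
        (PySem.Dict.mk (temp.items ++ (l.filter (fun y => decide (k1 ≠ y))).map (entryB d k1)),
         if (l.filter (fun y => decide (k1 ≠ y))) = [] then res
         else res.insert k1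
           (PySem.Dict.mk (temp.items ++ (l.filter (fun y => decide (k1 ≠ y))).map (entryB d k1)))) := by
  intro l
  induction l with
  | nil => intro temp res _ _; simp
  | cons k2 l ih =>
    intro temp res hnd hfresh
    by_cases h : k1 = k2
    · have hf : (List.filter (fun y => decide (k1 ≠ y)) (k2 :: l)) = List.filter (fun y => decide (k1 ≠ y)) l := by
        simp [h]
      rw [List.foldl_cons]
      have hstep : simInner d k1 (temp, res) k2 = (temp, res) := by
        simp [simInner, h]
      rw [hstep, ih temp res (by rw [← hf]; exact hnd) (fun y hy => hfresh y (List.mem_cons_of_mem _ hy)), hf]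
    · have hf : (List.filter (fun y => decide (k1 ≠ y)) (k2 :: l)) = k2 :: List.filter (fun y => decide (k1 ≠ y)) l := by
        simp [h]
      rw [hf] at hnd
      have hk2nf : k2 ∉ List.filter (fun y => decide (k1 ≠ y)) l := (List.nodup_cons.1 hnd).1
      have hndl : (List.filter (fun y => decide (k1 ≠ y)) l).Nodup := (List.nodup_cons.1 hnd).2
      have htc : temp.contains k2 = false := hfresh k2 (List.mem_cons_self) h
      set a := dotOnce (d.getD k1 []) (d.getD k2 []) with ha
      have hstep : simInner d k1 (temp, res) k2 = (temp.insert k2 a, res.insert k1 (temp.insert k2 a)) := by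
        simp [simInner, h, dot_funext, ← ha]
      rw [List.foldl_cons, hstep]
      have hfresh' : ∀ y ∈ l, k1 ≠ y → (temp.insert k2 a).contains y = false := by
        intro y hy hne
        rw [PySem.Dict.contains_insert]
        have hyf : y ∈ List.filter (fun y => decide (k1 ≠ y)) l := by
          simp [List.mem_filter, hy, hne]
        have : y ≠ k2 := fun hc => hk2nf (hc ▸ hyf)
        simp [this, hfresh y (List.mem_cons_of_mem _ hy) hne]
      rw [ih (temp.insert k2 a) (res.insert k1 (temp.insert k2 a)) hndl hfresh']
      have hitems : (temp.insert k2 a).items = temp.items ++ [(k2, a)] :=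
        PySem.Dict.items_insert_of_not_contains temp a htc
      have hTeq : PySem.Dict.mk ((temp.insert k2 a).items
            ++ (List.filter (fun y => decide (k1 ≠ y)) l).map (entryB d k1)) =
          PySem.Dict.mk (temp.items
            ++ (k2 :: List.filter (fun y => decide (k1 ≠ y)) l).map (entryB d k1)) := by
        rw [hitems]
        simp [entryB, ← ha]
      rw [hf]
      rw [if_neg (List.cons_ne_nil k2 _)]
      by_cases hl : List.filter (fun y => decide (k1 ≠ y)) l = []
      · rw [if_pos hl]
        have h2 : temp.insert k2 a = PySem.Dict.mk (temp.items
            ++ (k2 :: List.filter (fun y => decide (k1 ≠ y)) l).map (entryB d k1)) := by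
          apply PySem.Dict.ext
          rw [hitems, hl]
          simp [entryB, ← ha]
        rw [hl] at hTeq ⊢
        rw [hTeq, h2, hl]
      · rw [if_neg hl, PySem.Dict.insert_insert_self, hTeq]


-- A's outer loop appends one (key, row) pair per user whose row is nonempty
theorem A_outer (d : PySem.Dict String (List Int)) (hkd : d.keys.Nodup) :
    ∀ (l : List String) (res : PySem.Dict String (PySem.Dict String (Option Int))),
      l.Nodup → (∀ x ∈ l, res.contains x = false) →
      l.foldl (fun res key1 => (d.keys.foldl (simInner d key1) (PySem.Dict.empty, res)).2) res =
        PySem.Dict.mk (res.items ++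
          (l.filter (fun x => decide (othersFor d d.keys x ≠ []))).map
            (fun x => (x, PySem.Dict.mk (othersFor d d.keys x)))) := by
  intro l
  induction l with
  | nil => intro res _ _; simp
  | cons x l ih =>
    intro res hnd hfresh
    rw [List.foldl_cons]
    have hfd : (d.keys.filter (fun y => decide (x ≠ y))).Nodup := hkd.filter _
    have hfreshE : ∀ y ∈ d.keys, x ≠ y →
        (PySem.Dict.empty : PySem.Dict String (Option Int)).contains y = false := by
      intro y _ _
      exact PySem.Dict.contains_empty y
    have hndl : l.Nodup := (List.nodup_cons.1 hnd).2
    have hxl : x ∉ l := (List.nodup_cons.1 hnd).1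
    rw [A_inner d x d.keys PySem.Dict.empty res hfd hfreshE]
    by_cases hx : othersFor d d.keys x = []
    · have hfil : d.keys.filter (fun y => decide (x ≠ y)) = [] :=
        List.map_eq_nil_iff.1 hx
      rw [if_pos hfil]
      rw [ih res hndl (fun y hy => hfresh y (List.mem_cons_of_mem _ hy))]
      rw [List.filter_cons_of_neg (by simp [hx])]
    · have hfil : d.keys.filter (fun y => decide (x ≠ y)) ≠ [] := by
        intro hc
        exact hx (by unfold othersFor; rw [hc]; rfl)
      rw [if_neg hfil]
      have hres' : res.insert x (PySem.Dict.mk (PySem.Dict.empty.items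
            ++ (d.keys.filter (fun y => decide (x ≠ y))).map (entryB d x)))
          = res.insert x (PySem.Dict.mk (othersFor d d.keys x)) := by
        rfl
      rw [hres']
      have hfresh' : ∀ y ∈ l, (res.insert x (PySem.Dict.mk (othersFor d d.keys x))).contains y = false := by
        intro y hy
        rw [PySem.Dict.contains_insert]
        have : y ≠ x := fun hc => hxl (hc ▸ hy)
        simp [this, hfresh y (List.mem_cons_of_mem _ hy)]
      rw [ih _ hndl hfresh']
      have hitems : (res.insert x (PySem.Dict.mk (othersFor d d.keys x))).items
          = res.items ++ [(x, PySem.Dict.mk (othersFor d d.keys x))] :=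
        PySem.Dict.items_insert_of_not_contains res _ (hfresh x List.mem_cons_self)
      rw [List.filter_cons_of_pos (by simp [hx])]
      apply PySem.Dict.ext
      simp [hitems]

-- oriented pair (x, y) already processed by B, 'done' users finished, k1 current, p processed part of pending
def condP (done : List String) (k1 : String) (p : List String) (x y : String) : Bool :=
  decide (x ∈ done) || decide (y ∈ done) || (decide (x = k1) && decide (y ∈ p)) ||
    (decide (y = k1) && decide (x ∈ p))

-- row of user x restricted to the pairs already processed
def innerL (d : PySem.Dict String (List Int)) (ks : List String)
    (c : String → String → Bool) (x : String) : List (String × Option Int) :=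
  ((ks.filter (fun y => decide (x ≠ y))).filter (c x)).map (entryB d x)

-- B's loop invariant: keys = users with a nonempty partial row (in ks order), each mapped to it
def StateOK (d : PySem.Dict String (List Int)) (ks : List String)
    (c : String → String → Bool) (S : PySem.Dict String (PySem.Dict String (Option Int))) : Prop :=
  S.keys = ks.filter (fun x => decide (innerL d ks c x ≠ [])) ∧
  ∀ x ∈ ks, S.getD x PySem.Dict.empty = PySem.Dict.mk (innerL d ks c x)

theorem StateOK_congr (d : PySem.Dict String (List Int)) (ks : List String)
    (c c' : String → String → Bool) (S : PySem.Dict String (PySem.Dict String (Option Int)))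
    (h : ∀ x ∈ ks, ∀ y ∈ ks, x ≠ y → c x y = c' x y) :
    StateOK d ks c S → StateOK d ks c' S := by
  intro hS
  obtain ⟨hk, hg⟩ := hS
  have hinner : ∀ x ∈ ks, innerL d ks c x = innerL d ks c' x := by
    intro x hx
    unfold innerL
    congr 1
    apply List.filter_congr
    intro y hy
    have hy' := List.mem_filter.1 hy
    exact h x hx y hy'.1 (by simpa using hy'.2)
  constructor
  · rw [hk]
    apply List.filter_congr
    intro x hx
    rw [hinner x hx]
  · intro x hx
    rw [hg x hx, hinner x hx]

theorem nodup_facts (done p m : List String) (k1 k2 : String)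
    (hnd : (done ++ k1 :: (p ++ k2 :: m)).Nodup) :
    k1 ∉ done ∧ k2 ∉ done ∧ k1 ∉ p ∧ k2 ∉ p ∧ k1 ∉ m ∧ k2 ∉ m ∧ k1 ≠ k2 ∧
      (∀ y ∈ p, y ∉ done) ∧ (∀ y ∈ m, y ∉ done) ∧ (∀ y ∈ m, y ∉ p) := by
  simp [List.nodup_append, List.nodup_cons] at hnd
  obtain ⟨h1, h2, h3⟩ := hnd
  refine ⟨fun hc => (h3 k1 hc).1 rfl,
          fun hc => (h3 k2 hc).2 k2 (Or.inr (Or.inl rfl)) rfl,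
          h2.1.1, fun hc => (h2.2.2.2 k2 hc).1 rfl, h2.1.2.2, h2.2.2.1.1, h2.1.2.1,
          fun y hy hc => (h3 y hc).2 y (Or.inl hy) rfl,
          fun y hy hc => (h3 y hc).2 y (Or.inr (Or.inr hy)) rfl,
          fun y hy hc => (h2.2.2.2 y hc).2 y hy rfl⟩


theorem filter_ne_eq (x : String) (l : List String) (hx : x ∉ l) :
    l.filter (fun y => decide (x ≠ y)) = l :=
  List.filter_eq_self.2 (fun y hy => by simp; exact fun hc => hx (hc ▸ hy))

theorem B_step (d : PySem.Dict String (List Int)) (done p m : List String) (k1 k2 : String)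
    (hnd : (done ++ k1 :: (p ++ k2 :: m)).Nodup)
    (S : PySem.Dict String (PySem.Dict String (Option Int)))
    (hS : StateOK d (done ++ k1 :: (p ++ k2 :: m)) (condP done k1 p) S) :
    StateOK d (done ++ k1 :: (p ++ k2 :: m)) (condP done k1 (p ++ [k2])) (simPair d k1 S k2) := by
  obtain ⟨hd1, hd2, hp1, hp2, hm1, hm2, h12, hpd, hmd, hmp⟩ := nodup_facts done p m k1 k2 hnd
  obtain ⟨hk, hg⟩ := hS
  set ks := done ++ k1 :: (p ++ k2 :: m) with hks
  have hk1ks : k1 ∈ ks := by simp [hks]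
  have hk2ks : k2 ∈ ks := by simp [hks]
  have h21 : k2 ≠ k1 := Ne.symm h12
  -- row base lists
  have hC1 : ks.filter (fun y => decide (k1 ≠ y)) = done ++ (p ++ k2 :: m) := by
    rw [hks, List.filter_append, List.filter_cons_of_neg (by simp),
        filter_ne_eq k1 done hd1, filter_ne_eq k1 (p ++ k2 :: m) (by simp [hp1, hm1, h12])]
  have hC2 : ks.filter (fun y => decide (k2 ≠ y)) = done ++ k1 :: (p ++ m) := by
    rw [hks, List.filter_append, filter_ne_eq k2 done hd2,
        List.filter_cons_of_pos (by simp [h21]), List.filter_append,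
        filter_ne_eq k2 p hp2, List.filter_cons_of_neg (by simp),
        filter_ne_eq k2 m hm2]
  -- row computations
  have e1 : innerL d ks (condP done k1 p) k1 = (done ++ p).map (entryB d k1) := by
    unfold innerL
    rw [hC1, List.filter_append, List.filter_append,
        List.filter_eq_self.2 (fun y hy => by simp [condP, hy]),
        List.filter_eq_self.2 (fun y hy => by simp [condP, hy]),
        List.filter_eq_nil_iff.2 (fun y hy => ?_), List.append_nil]
    rcases List.mem_cons.1 hy with hy | hy
    · subst hy; simp [condP, hd1, hd2, hp2, h21]
    · have hy1 : ¬ y = k1 := fun hc => hm1 (hc ▸ hy)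
      simp [condP, hd1, hmd y hy, hmp y hy, hy1]
  have e1' : innerL d ks (condP done k1 (p ++ [k2])) k1 = ((done ++ p) ++ [k2]).map (entryB d k1) := by
    unfold innerL
    rw [hC1, List.filter_append, List.filter_append,
        List.filter_eq_self.2 (fun y hy => by simp [condP, hy]),
        List.filter_eq_self.2 (fun y hy => by simp [condP, List.mem_append, hy]),
        List.filter_cons_of_pos (by simp [condP]),
        List.filter_eq_nil_iff.2 (fun y hy => ?_)]
    · simp
    · have hy1 : ¬ y = k1 := fun hc => hm1 (hc ▸ hy)
      have hy2 : ¬ y = k2 := fun hc => hm2 (hc ▸ hy)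
      simp [condP, hd1, hmd y hy, hmp y hy, hy1, hy2]
  have e2 : innerL d ks (condP done k1 p) k2 = done.map (entryB d k2) := by
    unfold innerL
    rw [hC2, List.filter_append,
        List.filter_eq_self.2 (fun y hy => by simp [condP, hy]),
        List.filter_eq_nil_iff.2 (fun y hy => ?_), List.append_nil]
    rcases List.mem_cons.1 hy with hy | hy
    · subst hy; simp [condP, hd1, hd2, hp2, h21]
    · rcases List.mem_append.1 hy with hy | hy
      · have hy1 : ¬ y = k1 := fun hc => hp1 (hc ▸ hy)
        simp [condP, hd2, hpd y hy, hy1, hp2, h21]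
      · have hy1 : ¬ y = k1 := fun hc => hm1 (hc ▸ hy)
        simp [condP, hd2, hmd y hy, hy1, hp2, h21]
  have e2' : innerL d ks (condP done k1 (p ++ [k2])) k2 = (done ++ [k1]).map (entryB d k2) := by
    unfold innerL
    rw [hC2, List.filter_append,
        List.filter_eq_self.2 (fun y hy => by simp [condP, hy]),
        List.filter_cons_of_pos (by simp [condP]),
        List.filter_eq_nil_iff.2 (fun y hy => ?_)]
    · rcases List.mem_append.1 hy with hy | hy
      · have hy1 : ¬ y = k1 := fun hc => hp1 (hc ▸ hy)
        simp [condP, hd2, hpd y hy, hy1, List.mem_append, hp2, h21]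
      · have hy1 : ¬ y = k1 := fun hc => hm1 (hc ▸ hy)
        have hy2 : ¬ y = k2 := fun hc => hm2 (hc ▸ hy)
        simp [condP, hd2, hmd y hy, hy1, List.mem_append, hp2, h21, hy2]
  -- rows of users other than k1, k2 are untouched
  have e3 : ∀ x, ¬ x = k1 → ¬ x = k2 →
      innerL d ks (condP done k1 p) x = innerL d ks (condP done k1 (p ++ [k2])) x := by
    intro x hx1 hx2
    unfold innerL
    congr 1
    apply List.filter_congr
    intro y _
    simp [condP, hx1, List.mem_append, hx2]
  -- nonemptiness via a witness member
  have hne_of_mem : ∀ (c : String → String → Bool) (x y0 : String), y0 ∈ ks → x ≠ y0 →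
      c x y0 = true → innerL d ks c x ≠ [] := by
    intro c x y0 h1 h2 h3 hc
    unfold innerL at hc
    rw [List.map_eq_nil_iff] at hc
    have : y0 ∈ (ks.filter (fun y => decide (x ≠ y))).filter (c x) :=
      List.mem_filter.2 ⟨List.mem_filter.2 ⟨h1, by simp [h2]⟩, h3⟩
    rw [hc] at this
    simp at this
  -- empty rows of unreached users when done = []
  have e_m : done = [] → ∀ x ∈ m, ∀ (q : List String), x ∉ q →
      innerL d ks (condP done k1 q) x = [] := by
    intro hdone x hx q hxq
    unfold innerL
    rw [List.filter_eq_nil_iff.2 (fun y _ => ?_)]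
    · simp
    · have hx1 : ¬ x = k1 := fun hc => hm1 (hc ▸ hx)
      simp [condP, hdone, hx1, hxq]
  -- the two modifies
  have hsp : simPair d k1 S k2 =
      PySem.Dict.modify
        (S.modify k1 PySem.Dict.empty
          (fun inner => inner.insert k2 (dotOnce (d.getD k1 []) (d.getD k2 []))))
        k2 PySem.Dict.empty
        (fun inner => inner.insert k1 (dotOnce (d.getD k1 []) (d.getD k2 []))) := rfl
  set a := dotOnce (d.getD k1 []) (d.getD k2 []) with ha
  have hGf : ∀ x : String, (simPair d k1 S k2).getD x PySem.Dict.empty =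
      if x = k2 then (S.getD k2 PySem.Dict.empty).insert k1 a
      else if x = k1 then (S.getD k1 PySem.Dict.empty).insert k2 a
      else S.getD x PySem.Dict.empty := by
    intro x
    rw [hsp, PySem.Dict.getD_modify]
    by_cases hx2 : x = k2
    · subst hx2
      rw [if_pos rfl, if_pos rfl, PySem.Dict.getD_modify, if_neg h21]
    · rw [if_neg hx2, if_neg hx2, PySem.Dict.getD_modify]
  -- no-entry-yet facts for the two inserts
  have hcont1 : (PySem.Dict.mk ((done ++ p).map (entryB d k1))).contains k2 = false := by
    rw [PySem.Dict.contains_mk]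
    simp only [List.any_map, List.any_eq_false]
    intro y hy
    rcases List.mem_append.1 hy with hy | hy
    · simp [entryB]; exact fun hc => hd2 (hc ▸ hy)
    · simp [entryB]; exact fun hc => hp2 (hc ▸ hy)
  have hcont2 : (PySem.Dict.mk (done.map (entryB d k2))).contains k1 = false := by
    rw [PySem.Dict.contains_mk]
    simp only [List.any_map, List.any_eq_false]
    intro y hy
    simp [entryB]; exact fun hc => hd1 (hc ▸ hy)
  constructor
  · -- the keys
    have hkm : (simPair d k1 S k2).keys =
        ((S.modify k1 PySem.Dict.empty (fun inner => inner.insert k2 a)).insert k2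
          ((S.modify k1 PySem.Dict.empty (fun inner => inner.insert k2 a)).getD k2 PySem.Dict.empty
            |>.insert k1 a)).keys := by
      rw [hsp, PySem.Dict.keys_modify]
    by_cases hdone : done = []
    · by_cases hp : p = []
      · -- first pair of the whole run: both k1 and k2 are appended
        have hfpk1 : innerL d ks (condP done k1 p) k1 = [] := by
          rw [e1, hdone, hp]; simp
        have hfpk2 : innerL d ks (condP done k1 p) k2 = [] := by
          rw [e2, hdone]; simp
        have hSk : S.keys = [] := by
          rw [hk]
          apply List.filter_eq_nil_iff.2
          intro x hx
          rw [hks, hdone, hp] at hx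
          simp only [List.nil_append] at hx
          rcases List.mem_cons.1 hx with hx | hx
          · simp [hx, hfpk1]
          · rcases List.mem_cons.1 hx with hx | hx
            · simp [hx, hfpk2]
            · simp [e_m hdone x hx p (by rw [hp]; simp)]
        have hc1 : S.contains k1 = false := by
          rw [PySem.Dict.contains_eq_decide_mem_keys, hSk]
          simp
        have hkeys1 : (S.modify k1 PySem.Dict.empty (fun inner => inner.insert k2 a)).keys
            = S.keys ++ [k1] := by
          rw [PySem.Dict.keys_modify, PySem.Dict.keys_insert_of_not_contains _ _ hc1]
        have hc2 : (S.modify k1 PySem.Dict.empty (fun inner => inner.insert k2 a)).contains k2 = false := by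
          rw [PySem.Dict.contains_eq_decide_mem_keys, hkeys1, hSk]
          simp [h21]
        rw [hkm, PySem.Dict.keys_insert_of_not_contains _ _ hc2, hkeys1, hSk]
        subst hdone
        subst hp
        simp only [hks, List.nil_append] at e1' e2' ⊢
        have hm' : ∀ x ∈ m, innerL d (k1 :: k2 :: m) (condP [] k1 [k2]) x = [] := by
          intro x hx
          have h := e_m rfl x hx [k2] (by simp only [List.mem_singleton]; exact fun hc => hm2 (hc ▸ hx))
          simpa only [hks, List.nil_append] using h
        rw [List.filter_cons_of_pos (by simp [e1']), List.filter_cons_of_pos (by simp [e2']),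
            List.filter_eq_nil_iff.2 (fun x hx => by simp [hm' x hx])]
        rfl
      · -- k1 already has entries (from p), k2 is appended
        have hfpk1 : innerL d ks (condP done k1 p) k1 ≠ [] := by
          rw [e1, hdone]
          simp [hp]
        have hc1 : S.contains k1 = true := by
          rw [PySem.Dict.contains_eq_decide_mem_keys, hk]
          simp only [decide_eq_true_eq]
          exact List.mem_filter.2 ⟨hk1ks, by simp [hfpk1]⟩
        have hkeys1 : (S.modify k1 PySem.Dict.empty (fun inner => inner.insert k2 a)).keys
            = S.keys := by
          rw [PySem.Dict.keys_modify, PySem.Dict.keys_insert_of_contains _ _ hc1]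
        have hfpk2 : innerL d ks (condP done k1 p) k2 = [] := by rw [e2, hdone]; simp
        have hc2 : (S.modify k1 PySem.Dict.empty (fun inner => inner.insert k2 a)).contains k2 = false := by
          rw [PySem.Dict.contains_eq_decide_mem_keys, hkeys1, hk]
          simp only [decide_eq_false_iff_not]
          intro hc
          exact (by simpa [hfpk2] using (List.mem_filter.1 hc).2)
        have hppos : ∀ x ∈ p, innerL d ks (condP done k1 p) x ≠ [] := fun x hx =>
          hne_of_mem _ x k1 hk1ks (fun hc => hp1 (hc ▸ hx)) (by simp [condP, hx])
        have hppos' : ∀ x ∈ p, innerL d ks (condP done k1 (p ++ [k2])) x ≠ [] := fun x hx =>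
          hne_of_mem _ x k1 hk1ks (fun hc => hp1 (hc ▸ hx)) (by simp [condP, List.mem_append, hx])
        rw [hkm, PySem.Dict.keys_insert_of_not_contains _ _ hc2, hkeys1, hk]
        subst hdone
        have hmA : ∀ x ∈ m, innerL d (k1 :: (p ++ k2 :: m)) (condP [] k1 p) x = [] := by
          intro x hx
          have h := e_m rfl x hx p (hmp x hx)
          simpa only [hks, List.nil_append] using h
        have hmB : ∀ x ∈ m, innerL d (k1 :: (p ++ k2 :: m)) (condP [] k1 (p ++ [k2])) x = [] := by
          intro x hx
          have h := e_m rfl x hx (p ++ [k2]) (by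
            simp only [List.mem_append, List.mem_singleton]
            exact fun h => h.elim (hmp x hx) (fun hc => hm2 (hc ▸ hx)))
          simpa only [hks, List.nil_append] using h
        simp only [hks, List.nil_append] at e1' e2' hfpk1 hfpk2 hppos hppos' ⊢
        have hL : List.filter
            (fun x => decide (innerL d (k1 :: (p ++ k2 :: m)) (condP [] k1 p) x ≠ []))
            (k1 :: (p ++ k2 :: m)) = k1 :: p := by
          rw [List.filter_cons_of_pos (by simp [hfpk1]), List.filter_append,
              List.filter_eq_self.2 (fun x hx => by simp [hppos x hx]),
              List.filter_cons_of_neg (by simp [hfpk2]),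
              List.filter_eq_nil_iff.2 (fun x hx => by simp [hmA x hx])]
          simp
        have hR : List.filter
            (fun x => decide (innerL d (k1 :: (p ++ k2 :: m)) (condP [] k1 (p ++ [k2])) x ≠ []))
            (k1 :: (p ++ k2 :: m)) = k1 :: (p ++ [k2]) := by
          rw [List.filter_cons_of_pos (by simp [e1']), List.filter_append,
              List.filter_eq_self.2 (fun x hx => by simp [hppos' x hx]),
              List.filter_cons_of_pos (by simp [e2']),
              List.filter_eq_nil_iff.2 (fun x hx => by simp [hmB x hx])]
        rw [hL, hR]
        simp
    · -- done nonempty: every user already has a row; keys are unchanged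
      obtain ⟨y0, hy0⟩ := List.exists_mem_of_ne_nil done hdone
      have hy0ks : y0 ∈ ks := by simp [hks, hy0]
      have hall : ∀ (q : List String), ∀ x ∈ ks, innerL d ks (condP done k1 q) x ≠ [] := by
        intro q x hx
        rw [hks] at hx
        rcases List.mem_append.1 hx with hxd | hxc
        · exact hne_of_mem _ x k1 hk1ks (fun hc => hd1 (hc ▸ hxd)) (by simp [condP, hxd])
        · rcases List.mem_cons.1 hxc with hx1 | hxr
          · exact hne_of_mem _ x y0 hy0ks (fun hc => hd1 (hx1 ▸ hc ▸ hy0)) (by simp [condP, hy0])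
          · have hxy0 : x ≠ y0 := by
              intro hc
              rcases List.mem_append.1 hxr with hxp | hxk
              · exact hpd x hxp (hc ▸ hy0)
              · rcases List.mem_cons.1 hxk with hx2 | hxm
                · exact hd2 (hx2 ▸ hc ▸ hy0)
                · exact hmd x hxm (hc ▸ hy0)
            exact hne_of_mem _ x y0 hy0ks hxy0 (by simp [condP, hy0])
      have hSk : S.keys = ks := by
        rw [hk]
        exact List.filter_eq_self.2 (fun x hx => by simp [hall p x hx])
      have hc1 : S.contains k1 = true := by
        rw [PySem.Dict.contains_eq_decide_mem_keys, hSk]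
        simp [hk1ks]
      have hkeys1 : (S.modify k1 PySem.Dict.empty (fun inner => inner.insert k2 a)).keys
          = S.keys := by
        rw [PySem.Dict.keys_modify, PySem.Dict.keys_insert_of_contains _ _ hc1]
      have hc2 : (S.modify k1 PySem.Dict.empty (fun inner => inner.insert k2 a)).contains k2 = true := by
        rw [PySem.Dict.contains_eq_decide_mem_keys, hkeys1, hSk]
        simp [hk2ks]
      rw [hkm, PySem.Dict.keys_insert_of_contains _ _ hc2, hkeys1, hSk]
      exact (List.filter_eq_self.2 (fun x hx => by simp [hall (p ++ [k2]) x hx])).symm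
  · -- the getD part
    intro x hx
    rw [hGf]
    by_cases hx2 : x = k2
    · subst hx2
      rw [if_pos rfl, hg x hx, e2, e2']
      apply PySem.Dict.ext
      rw [PySem.Dict.items_insert_of_not_contains _ _ hcont2]
      show done.map (entryB d x) ++ [(k1, a)] = _
      rw [List.map_append]
      congr 1
      simp [entryB, ha, dotOnce_comm]
    · rw [if_neg hx2]
      by_cases hx1 : x = k1
      · subst hx1
        rw [if_pos rfl, hg x hx, e1, e1']
        apply PySem.Dict.ext
        rw [PySem.Dict.items_insert_of_not_contains _ _ hcont1]
        show (done ++ p).map (entryB d x) ++ [(k2, a)] = _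
        rw [List.map_append]
        simp [entryB, ha]
      · rw [if_neg hx1, hg x hx, e3 x hx1 hx2]


theorem B_phase (d : PySem.Dict String (List Int)) (done : List String) (k1 : String) :
    ∀ (m p : List String) (S : PySem.Dict String (PySem.Dict String (Option Int))),
      (done ++ k1 :: (p ++ m)).Nodup →
      StateOK d (done ++ k1 :: (p ++ m)) (condP done k1 p) S →
      StateOK d (done ++ k1 :: (p ++ m)) (condP done k1 (p ++ m)) (m.foldl (simPair d k1) S) := by
  intro m
  induction m with
  | nil =>
    intro p S _ hS
    simpa using hS
  | cons k2 m ih =>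
    intro p S hnd hS
    rw [List.foldl_cons]
    have hnd' : (done ++ k1 :: ((p ++ [k2]) ++ m)).Nodup := by
      simpa [List.append_assoc] using hnd
    have hstep' : StateOK d (done ++ k1 :: ((p ++ [k2]) ++ m)) (condP done k1 (p ++ [k2]))
        (simPair d k1 S k2) := by
      simpa [List.append_assoc] using B_step d done p m k1 k2 hnd S hS
    simpa [List.append_assoc] using ih (p ++ [k2]) (simPair d k1 S k2) hnd' hstep'

def cond0 (done : List String) (x y : String) : Bool :=
  decide (x ∈ done) || decide (y ∈ done)

theorem B_outer (d : PySem.Dict String (List Int)) :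
    ∀ (l done : List String) (S : PySem.Dict String (PySem.Dict String (Option Int))),
      (done ++ l).Nodup →
      StateOK d (done ++ l) (cond0 done) S →
      simLoop d l S = specDict d (done ++ l) := by
  intro l
  induction l with
  | nil =>
    intro done S hnd hS
    obtain ⟨hk, hg⟩ := hS
    rw [List.append_nil] at hk hg hnd ⊢
    have hinner : ∀ x ∈ done, innerL d done (cond0 done) x = othersFor d done x := by
      intro x hx
      unfold innerL othersFor
      rw [List.filter_eq_self.2 (fun y _ => by simp [cond0, hx])]
    show S = specDict d done
    apply PySem.Dict.ext
    rw [PySem.Dict.items_eq_map_keys S (by rw [hk]; exact hnd.filter _) PySem.Dict.empty, hk]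
    show _ = (done.filter (fun x => decide (othersFor d done x ≠ []))).map
      (fun x => (x, PySem.Dict.mk (othersFor d done x)))
    rw [List.filter_congr (fun x hx => by rw [hinner x hx])]
    apply List.map_congr_left
    intro x hxf
    have hxd : x ∈ done := (List.mem_filter.1 hxf).1
    rw [hg x hxd, hinner x hxd]
  | cons k1 l ih =>
    intro done S hnd hS
    show simLoop d l (l.foldl (simPair d k1) S) = _
    have hnd0 : (done ++ k1 :: ([] ++ l)).Nodup := by simpa using hnd
    have hS0 : StateOK d (done ++ k1 :: ([] ++ l)) (condP done k1 []) S := by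
      have := StateOK_congr d (done ++ k1 :: l) (cond0 done) (condP done k1 []) S
        (fun x _ y _ _ => by simp [cond0, condP]) hS
      simpa using this
    have hphase := B_phase d done k1 l [] S hnd0 hS0
    have hcond : ∀ x ∈ done ++ k1 :: l, ∀ y ∈ done ++ k1 :: l, x ≠ y →
        condP done k1 l x y = cond0 (done ++ [k1]) x y := by
      intro x hx y hy hxy
      simp only [List.mem_append, List.mem_cons] at hx hy
      rw [Bool.eq_iff_iff]
      simp only [condP, cond0, Bool.or_eq_true, Bool.and_eq_true, decide_eq_true_eq,
        List.mem_append, List.mem_singleton]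
      have hne : x = k1 → y = k1 → False := fun a b => hxy (a.trans b.symm)
      constructor
      · tauto
      · tauto
    have hS1 : StateOK d ((done ++ [k1]) ++ l) (cond0 (done ++ [k1])) (l.foldl (simPair d k1) S) := by
      have := StateOK_congr d (done ++ k1 :: l) (condP done k1 l) (cond0 (done ++ [k1]))
        (l.foldl (simPair d k1) S) hcond (by simpa using hphase)
      simpa [List.append_assoc] using this
    have hnd1 : ((done ++ [k1]) ++ l).Nodup := by simpa [List.append_assoc] using hnd
    rw [ih (done ++ [k1]) (l.foldl (simPair d k1) S) hnd1 hS1]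
    congr 1
    simp

theorem B_whole (d : PySem.Dict String (List Int)) (hkd : d.keys.Nodup) :
    simLoop d d.keys PySem.Dict.empty = specDict d d.keys := by
  have h0 : StateOK d ([] ++ d.keys) (cond0 []) PySem.Dict.empty := by
    constructor
    · rw [List.filter_eq_nil_iff.2 ?_]
      · rfl
      · intro x _
        simp [innerL, cond0]
    · intro x _
      rw [PySem.Dict.getD_of_not_contains _ _ (PySem.Dict.contains_empty x)]
      apply PySem.Dict.ext
      show ([] : List (String × Option Int)) = _
      simp [innerL, cond0]
  have := B_outer d d.keys [] PySem.Dict.empty (by simpa using hkd) h0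
  simpa using this

theorem A_whole (d : PySem.Dict String (List Int)) (hkd : d.keys.Nodup) :
    d.keys.foldl (fun res key1 => (d.keys.foldl (simInner d key1) (PySem.Dict.empty, res)).2)
      PySem.Dict.empty = specDict d d.keys := by
  rw [A_outer d hkd d.keys PySem.Dict.empty hkd (fun x _ => PySem.Dict.contains_empty x)]
  unfold specDict
  rfl

-- ===== VERDICT (by name: the statement is the Claim_ definition above) =====
theorem sim_score_spec : Claim_equal_sim_score := by
  intro dict _
  simp only [Spec_sim_score, sim_score, sim_score_alt]
  rw [A_whole _ (PySem.Dict.nodup_keys_ofList dict), B_whole _ (PySem.Dict.nodup_keys_ofList dict)]
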